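-- pv_equiv track=rewrite | github.com/matthewmckenna/advent2017 | day09.py | count_garbage_characters
-- ===== SOURCE A (Python) =====
-- def count_garbage_characters(stream: str) -> int:
--     garbage_characters = 0
--     inside_garbage = previous_bang = False
--
--     for idx, character in enumerate(stream):
--         if idx != 0 and stream[idx-1] == '!' and not previous_bang:
--             previous_bang = True
--             continue
--
--         if inside_garbage and character == '>':
--             inside_garbage = False
--
--         if inside_garbage:
--             if character != '!':
--                 garbage_characters += 1
--
--         if not inside_garbage and character == '<':
--             inside_garbage = True
--
--         # reset this variable
--         previous_bang = False
--
--     return garbage_characters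
-- ===== SOURCE B (Python) =====
-- def count_garbage_characters(stream: str) -> int:
--     # Phase 1: strip escape sequences ('!' plus the following character; a lone
--     # trailing '!' is dropped too).
--     cleaned = []
--     i = 0
--     n = len(stream)
--     while i < n:
--         if stream[i] == '!':
--             i += 2
--         else:
--             cleaned.append(stream[i])
--             i += 1
--     # Phase 2: one scan with an inside-garbage flag.
--     count = 0
--     inside = False
--     for c in cleaned:
--         if inside and c == '>':
--             inside = False
--         elif inside:
--             count += 1
--         elif c == '<':
--             inside = True
--     return count
-- ===== Notes on version B (the rewrite author's own statement) =====
-- stated objective: idiomatic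
-- what changed: Replaced A's single interleaved scan with index lookbehind (stream[idx-1]) and a previous_bang flag by a two-phase structure: first strip every escape sequence ('!' plus the following character), then one plain inside-garbage scan of the cleaned stream.
import Mathlib
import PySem

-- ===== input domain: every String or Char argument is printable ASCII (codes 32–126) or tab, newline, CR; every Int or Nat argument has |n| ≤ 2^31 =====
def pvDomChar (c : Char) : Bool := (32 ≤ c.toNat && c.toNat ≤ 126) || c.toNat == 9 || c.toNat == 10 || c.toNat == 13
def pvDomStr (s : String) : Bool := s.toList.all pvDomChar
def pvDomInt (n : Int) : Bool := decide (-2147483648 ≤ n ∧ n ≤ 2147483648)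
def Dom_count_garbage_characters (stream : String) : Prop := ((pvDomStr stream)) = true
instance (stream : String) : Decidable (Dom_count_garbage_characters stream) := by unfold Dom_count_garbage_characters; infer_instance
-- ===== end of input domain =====

-- B replaces A's single interleaved scan with index lookbehind and a previous_bang flag by a
-- two-phase structure (strip escape sequences, then a plain inside-garbage scan); same return value.

-- ===== PORT A =====
-- A's loop body; state = (garbage_characters, inside_garbage, previous_bang);
-- `cs` is the whole stream, used for the stream[idx-1] lookbehind.
def pvStepA (cs : List Char) (st : Int × Bool × Bool) (p : Int × Char) : Int × Bool × Bool :=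
  if p.1 ≠ 0 ∧ PySem.List.pyGet? cs (p.1 - 1) = some '!' ∧ st.2.2 = false then
    (st.1, st.2.1, true)
  else
    let inside1 := if st.2.1 ∧ p.2 = '>' then false else st.2.1
    let count1 := if inside1 ∧ p.2 ≠ '!' then st.1 + 1 else st.1
    let inside2 := if ¬ inside1 ∧ p.2 = '<' then true else inside1
    (count1, inside2, false)

def count_garbage_characters (stream : String) : Int :=
  ((PySem.List.enumerate stream.toList 0).foldl (pvStepA stream.toList) (0, false, false)).1

-- ===== PORT B =====
-- Phase 1 of B: drop every '!' together with the following character (a lone trailing '!' too).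
def pvClean : List Char → List Char
  | [] => []
  | c :: rest => if c = '!' then pvClean rest.tail else c :: pvClean rest
termination_by cs => cs.length
decreasing_by
  all_goals simp [List.length_tail]

-- Phase 2 of B: the inside-garbage scan; state = (count, inside).
def pvStepB (st : Int × Bool) (c : Char) : Int × Bool :=
  if st.2 ∧ c = '>' then (st.1, false)
  else if st.2 then (st.1 + 1, st.2)
  else if c = '<' then (st.1, true)
  else st

def count_garbage_characters_alt (stream : String) : Int :=
  ((pvClean stream.toList).foldl pvStepB (0, false)).1

-- ===== PRECONDITION & SPEC =====
def Spec_count_garbage_characters (stream : String) (out : Int) : Prop := out = count_garbage_characters_alt stream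
instance (stream : String) (out : Int) : Decidable (Spec_count_garbage_characters stream out) := by unfold Spec_count_garbage_characters; infer_instance

-- ===== CLAIM (what is proved, stated in full; the proofs are below) =====
def Claim_equal_count_garbage_characters : Prop := ∀ (stream : String), Dom_count_garbage_characters stream → Spec_count_garbage_characters stream (count_garbage_characters stream)

-- ===== LEMMAS AND PROOFS =====

-- The processing step of A's loop when the character is not skipped.
def pvProc (st : Int × Bool × Bool) (c : Char) : Int × Bool × Bool :=
  let inside1 := if st.2.1 ∧ c = '>' then false else st.2.1
  let count1 := if inside1 ∧ c ≠ '!' then st.1 + 1 else st.1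
  let inside2 := if ¬ inside1 ∧ c = '<' then true else inside1
  (count1, inside2, false)

-- Local model of A's loop: `prev` is the previous character (none at idx 0).
def pvLoopA (prev : Option Char) (st : Int × Bool × Bool) : List Char → Int × Bool × Bool
  | [] => st
  | c :: rest =>
    if prev = some '!' ∧ st.2.2 = false then
      pvLoopA (some c) (st.1, st.2.1, true) rest
    else
      pvLoopA (some c) (pvProc st c) rest

theorem pvStepA_eq (cs : List Char) (st : Int × Bool × Bool) (p : Int × Char) :
    pvStepA cs st p =
      if p.1 ≠ 0 ∧ PySem.List.pyGet? cs (p.1 - 1) = some '!' ∧ st.2.2 = false then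
        (st.1, st.2.1, true)
      else pvProc st p.2 := rfl

-- A's indexed fold, run after a prefix `pre`, is the local loop with `prev = pre.getLast?`.
theorem pvFoldA_eq_loop (cs : List Char) :
    ∀ (pre : List Char) (st : Int × Bool × Bool),
      (PySem.List.enumerate cs (pre.length : Int)).foldl (pvStepA (pre ++ cs)) st
        = pvLoopA pre.getLast? st cs := by
  induction cs with
  | nil => intro pre st; simp [pvLoopA, PySem.List.enumerate]
  | cons c rest ih =>
    intro pre st
    rw [PySem.List.enumerate_cons, List.foldl_cons]
    have hstep : ∀ st', (PySem.List.enumerate rest ((pre.length : Int) + 1)).foldl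
          (pvStepA (pre ++ c :: rest)) st' = pvLoopA (some c) st' rest := by
      intro st'
      have h := ih (pre ++ [c]) st'
      simpa [List.append_assoc, List.getLast?_concat] using h
    have hget : pre ≠ [] → PySem.List.pyGet? (pre ++ c :: rest) ((pre.length : Int) - 1)
        = pre.getLast? := by
      intro hpre
      cases pre using List.reverseRecOn with
      | nil => exact absurd rfl hpre
      | append_singleton xs x =>
        have h1 : ((xs ++ [x]).length : Int) - 1 = ((xs.length : Nat) : Int) := by
          simp
        rw [h1, PySem.List.pyGet?_natCast]
        simp
    rw [pvStepA_eq]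
    by_cases hskip : (pre.length : Int) ≠ 0 ∧
        PySem.List.pyGet? (pre ++ c :: rest) ((pre.length : Int) - 1) = some '!' ∧ st.2.2 = false
    · have hpre : pre ≠ [] := by
        intro h; subst h; exact hskip.1 rfl
      have hprev : pre.getLast? = some '!' := by rw [← hget hpre]; exact hskip.2.1
      rw [if_pos hskip, hstep]
      conv_rhs => rw [pvLoopA]
      rw [if_pos ⟨hprev, hskip.2.2⟩]
    · rw [if_neg hskip, hstep]
      conv_rhs => rw [pvLoopA]
      rw [if_neg ?_]
      intro ⟨h1, h2⟩
      apply hskip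
      have hpre : pre ≠ [] := by
        intro h; subst h; simp at h1
      refine ⟨?_, ?_, h2⟩
      · have : pre.length ≠ 0 := by simpa using hpre
        exact_mod_cast fun h0 => this (by exact_mod_cast h0)
      · rw [hget hpre]; exact h1

theorem pvProc_bang (cnt : Int) (ins pb : Bool) :
    pvProc (cnt, ins, pb) '!' = (cnt, ins, false) := by
  simp [pvProc]

theorem pvProc_eq_stepB (cnt : Int) (ins pb : Bool) (c : Char) (hc : c ≠ '!') :
    pvProc (cnt, ins, pb) c = ((pvStepB (cnt, ins) c).1, (pvStepB (cnt, ins) c).2, false) := by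
  simp only [pvProc, pvStepB]
  by_cases h2 : ins <;> by_cases h1 : c = '>' <;> by_cases h3 : c = '<' <;> simp_all

-- Outside the middle of an escape, A's loop counts exactly what B's scan of the cleaned stream counts.
theorem pvLoopA_eq_B (n : Nat) :
    ∀ (cs : List Char), cs.length ≤ n →
    ∀ (prev : Option Char) (cnt : Int) (ins pb : Bool),
      ¬ (prev = some '!' ∧ pb = false) →
      (pvLoopA prev (cnt, ins, pb) cs).1 = ((pvClean cs).foldl pvStepB (cnt, ins)).1 := by
  induction n with
  | zero =>
    intro cs hlen prev cnt ins pb hnp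
    have : cs = [] := List.eq_nil_of_length_eq_zero (Nat.le_zero.1 hlen)
    subst this; simp [pvLoopA, pvClean]
  | succ n ih =>
    intro cs hlen prev cnt ins pb hnp
    match cs with
    | [] => simp [pvLoopA, pvClean]
    | c :: rest =>
      rw [pvLoopA, if_neg hnp]
      by_cases hc : c = '!'
      · subst hc
        rw [pvProc_bang, pvClean, if_pos rfl]
        match rest with
        | [] => simp [pvLoopA, pvClean]
        | x :: r =>
          rw [pvLoopA, if_pos ⟨rfl, rfl⟩]
          simp only [List.tail_cons]
          exact ih r (by simp at hlen; omega) (some x) cnt ins true (by simp)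
      · rw [pvProc_eq_stepB cnt ins pb c hc, pvClean, if_neg hc, List.foldl_cons]
        exact ih rest (by simp at hlen; omega) (some c) _ _ false (by simp [hc])

theorem pvA_eq_B (stream : String) :
    count_garbage_characters stream = count_garbage_characters_alt stream := by
  unfold count_garbage_characters count_garbage_characters_alt
  have h := pvFoldA_eq_loop stream.toList [] (0, false, false)
  simp only [List.length_nil, List.nil_append, Nat.cast_zero, List.getLast?_nil] at h
  rw [h]
  exact pvLoopA_eq_B stream.toList.length stream.toList le_rfl none 0 false false (by simp)

-- ===== VERDICT (by name: the statement is the Claim_ definition above) =====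
theorem count_garbage_characters_spec : Claim_equal_count_garbage_characters := by
  intro stream _
  exact pvA_eq_B stream
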